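-- pv_equiv track=rewrite | github.com/Geeoon/DNS-Tunnel-Keylogger | server/main.py | index_of_2nd
-- ===== SOURCE A (Python) =====
-- def index_of_2nd(string: str, sub: str):
--     index = 0
--     last = 0
--     for i in range(len(string)):
--         if string[i] == sub:
--             index = last
--             last = i
--     return index
-- ===== SOURCE B (Python) =====
-- def index_of_2nd(string: str, sub: str):
--     positions = [i for i, c in enumerate(string) if c == sub]
--     return positions[-2] if len(positions) >= 2 else 0
-- ===== Notes on version B (the rewrite author's own statement) =====
-- stated objective: simpler
-- what changed: Replaces the rolling two-scalar loop state with a comprehension collecting all match indices and a direct selection of the second-to-last one (or 0 when there are fewer than two matches).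
import Mathlib
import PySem

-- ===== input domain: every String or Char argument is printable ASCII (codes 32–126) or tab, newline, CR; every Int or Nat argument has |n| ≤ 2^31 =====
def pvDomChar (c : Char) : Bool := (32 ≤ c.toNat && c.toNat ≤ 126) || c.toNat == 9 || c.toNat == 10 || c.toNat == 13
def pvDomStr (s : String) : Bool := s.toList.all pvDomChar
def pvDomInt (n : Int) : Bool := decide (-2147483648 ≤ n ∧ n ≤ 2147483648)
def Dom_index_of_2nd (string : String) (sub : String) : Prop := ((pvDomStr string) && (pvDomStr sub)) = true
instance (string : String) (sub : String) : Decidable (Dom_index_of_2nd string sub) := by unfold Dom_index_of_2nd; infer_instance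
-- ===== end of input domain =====

-- B replaces A's rolling (index, last) scalar pair with a list of all match
-- indices and a direct pick of the second-to-last one; same O(n) cost, simpler shape.

-- ===== PORT A =====
-- the for-loop over range(len(string)) with string[i] accessed as the i-th char,
-- threading the (index, last) state exactly as A does
def indexOf2ndLoop (sub : String) : List (Int × Char) → Int × Int → Int × Int
  | [], st => st
  | (i, c) :: rest, st =>
      indexOf2ndLoop sub rest (if String.ofList [c] == sub then (st.2, i) else st)

def index_of_2nd (string : String) (sub : String) : Int :=
  (indexOf2ndLoop sub (PySem.List.enumerate string.toList 0) (0, 0)).1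

-- ===== PORT B =====
def index_of_2nd_alt (string : String) (sub : String) : Int :=
  let positions :=
    ((PySem.List.enumerate string.toList 0).filter
      (fun p => String.ofList [p.2] == sub)).map (·.1)
  if positions.length ≥ 2 then positions[positions.length - 2]! else 0

-- ===== PRECONDITION & SPEC =====
def Spec_index_of_2nd (string : String) (sub : String) (out : Int) : Prop := out = index_of_2nd_alt string sub
instance (string : String) (sub : String) (out : Int) : Decidable (Spec_index_of_2nd string sub out) := by unfold Spec_index_of_2nd; infer_instance

-- ===== CLAIM (what is proved, stated in full; the proofs are below) =====
def Claim_equal_index_of_2nd : Prop := ∀ (string : String) (sub : String), Dom_index_of_2nd string sub → Spec_index_of_2nd string sub (index_of_2nd string sub)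

-- ===== LEMMAS AND PROOFS =====

-- abstract "keep the last two seen" recursion the loop state realises
def penult2 : Int → Int → List Int → Int × Int
  | a, b, [] => (a, b)
  | _, b, x :: xs => penult2 b x xs

theorem indexOf2ndLoop_eq_penult2 (sub : String) :
    ∀ (l : List (Int × Char)) (a b : Int),
      indexOf2ndLoop sub l (a, b) =
        penult2 a b ((l.filter (fun p => String.ofList [p.2] == sub)).map (·.1)) := by
  intro l
  induction l with
  | nil => intro a b; rfl
  | cons p rest ih =>
      intro a b
      obtain ⟨i, c⟩ := p
      by_cases h : String.ofList [c] == sub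
      · simp only [indexOf2ndLoop, h, if_true]
        rw [ih]
        simp [h, penult2]
      · simp only [indexOf2ndLoop, h]
        rw [ih]
        simp [h]

theorem penult2_fst (ps : List Int) :
    ∀ (a b : Int),
      (penult2 a b ps).1 =
        if ps.length ≥ 2 then ps[ps.length - 2]!
        else if ps.length = 1 then b else a := by
  induction ps with
  | nil => intro a b; simp [penult2]
  | cons x xs ih =>
      intro a b
      show (penult2 b x xs).1 = _
      rw [ih b x]
      cases xs with
      | nil => simp
      | cons y ys =>
          cases ys with
          | nil => simp
          | cons z zs => simp; rfl

-- ===== VERDICT (by name: the statement is the Claim_ definition above) =====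
theorem index_of_2nd_spec : Claim_equal_index_of_2nd := by
  intro string sub _
  unfold Spec_index_of_2nd index_of_2nd index_of_2nd_alt
  rw [indexOf2ndLoop_eq_penult2]
  rw [penult2_fst]
  dsimp only
  split_ifs <;> rfl
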